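-- pv_equiv track=rewrite | github.com/mmagnus/rna-tools | rna_tools/tools/openfold/rna_geometric_cropping.py | mask_ss
-- ===== SOURCE A (Python) =====
-- from typing import Dict, List, Optional, Tuple
--
-- class DotBracketError(ValueError):
--     pass
--
-- def parse_dotbracket_pairs(ss: str) -> Dict[int, int]:
--     """
--     Parse dot-bracket into a dict i->j for paired residues (0-based indices).
--     Supports (), [], {}, <> as independent bracket types.
--
--     Returns:
--         pairs: dict mapping index to its paired index (both directions).
--     """
--     bracket_pairs = {
--         "(": ")",
--         "[": "]",
--         "{": "}",
--         "<": ">",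
--     }
--     opening = set(bracket_pairs.keys())
--     closing = {v: k for k, v in bracket_pairs.items()}
--
--     stacks: Dict[str, List[int]] = {op: [] for op in opening}
--     pairs: Dict[int, int] = {}
--
--     for i, ch in enumerate(ss):
--         if ch in opening:
--             stacks[ch].append(i)
--         elif ch in closing:
--             op = closing[ch]
--             if not stacks[op]:
--                 raise DotBracketError(f"Unbalanced dot-bracket: extra '{ch}' at position {i}")
--             j = stacks[op].pop()
--             pairs[i] = j
--             pairs[j] = i
--         elif ch == ".":
--             continue
--         else:
--             raise DotBracketError(f"Unsupported dot-bracket character '{ch}' at position {i}")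
--
--     leftovers = {op: st for op, st in stacks.items() if st}
--     if leftovers:
--         first_op = next(iter(leftovers))
--         raise DotBracketError(f"Unbalanced dot-bracket: missing closing for '{first_op}'")
--
--     return pairs
--
-- def mask_ss(ss: str, indices: List[int]) -> str:
--     """
--     Mask dot-bracket.
--     Residues outside crop become '.'. If one side of a pair is missing, both become '.'.
--     """
--     keep = set(indices)
--     pairs = parse_dotbracket_pairs(ss)
--
--     ss_list = list(ss)
--
--     # first blank everything outside
--     for i in range(len(ss_list)):
--         if i not in keep:
--             ss_list[i] = "."
--
--     # then fix broken pairs inside crop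
--     for i, j in pairs.items():
--         if i < j:
--             if (i in keep) ^ (j in keep):  # one in, one out
--                 ss_list[i] = "."
--                 ss_list[j] = "."
--             # if both in keep, keep original bracket symbols
--
--     # any non-dot outside keep already blanked
--     return "".join(ss_list)
-- ===== SOURCE B (Python) =====
-- from typing import List
--
--
-- class DotBracketError(ValueError):
--     pass
--
--
-- def mask_ss(ss: str, indices: List[int]) -> str:
--     """
--     Two staged passes with no stacks and no pairs dict: pass 1 validates and
--     records per-type prefix balances; pass 2 decides each position alone, finding
--     its partner by the closed-form balance rule (an opening at k pairs with the
--     first closing j>k of its type whose balance equals bal(k)+1; a closing at k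
--     pairs with the last such opening i<k with bal(i)=bal(k)-1).
--     """
--     keep = set(indices)
--     opens = "([{<"
--     closes = ")]}>"
--     n = len(ss)
--
--     # pass 1: validation + prefix balance table (bal[k][t] = balance of type t before position k)
--     bal = [[0, 0, 0, 0]]
--     for i, ch in enumerate(ss):
--         cur = list(bal[-1])
--         if ch in opens:
--             cur[opens.index(ch)] += 1
--         elif ch in closes:
--             t = closes.index(ch)
--             if cur[t] == 0:
--                 raise DotBracketError(f"Unbalanced dot-bracket: extra '{ch}' at position {i}")
--             cur[t] -= 1
--         elif ch != ".":
--             raise DotBracketError(f"Unsupported dot-bracket character '{ch}' at position {i}")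
--         bal.append(cur)
--     for t in range(4):
--         if bal[n][t]:
--             raise DotBracketError(f"Unbalanced dot-bracket: missing closing for '{opens[t]}'")
--
--     # pass 2: per-position closed-form partner lookup
--     out = []
--     for k, ch in enumerate(ss):
--         if ch == ".":
--             out.append(".")
--             continue
--         if ch in opens:
--             t = opens.index(ch)
--             # cannot fail after validation: every opening has a matching closing
--             j = next(j for j in range(k + 1, n)
--                      if ss[j] == closes[t] and bal[j][t] == bal[k][t] + 1)
--         else:
--             t = closes.index(ch)
--             j = max(i for i in range(k)
--                     if ss[i] == opens[t] and bal[i][t] == bal[k][t] - 1)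
--         out.append(ch if k in keep and j in keep else ".")
--     return "".join(out)
-- ===== Notes on version B (the rewrite author's own statement) =====
-- stated objective: alternative
-- what changed: B drops A's per-type stacks, pairs dict and two fix-up sweeps: a validation pass records per-type prefix balances, then each position independently finds its partner by the closed-form balance rule (an opening pairs with the first later closing of its type at balance bal+1, a closing with the last earlier opening at balance bal-1).
import Mathlib
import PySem

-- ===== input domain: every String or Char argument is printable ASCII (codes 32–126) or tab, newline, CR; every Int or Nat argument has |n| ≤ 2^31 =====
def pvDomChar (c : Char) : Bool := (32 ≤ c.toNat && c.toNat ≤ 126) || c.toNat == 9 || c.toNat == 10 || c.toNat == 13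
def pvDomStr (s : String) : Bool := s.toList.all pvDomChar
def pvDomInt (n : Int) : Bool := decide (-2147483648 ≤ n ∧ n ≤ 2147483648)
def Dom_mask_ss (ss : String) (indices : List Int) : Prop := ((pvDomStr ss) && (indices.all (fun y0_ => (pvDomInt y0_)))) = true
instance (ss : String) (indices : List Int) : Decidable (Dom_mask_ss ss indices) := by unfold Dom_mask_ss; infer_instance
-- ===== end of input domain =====

-- B replaces A's stack parse + pairs dict + two fix-up sweeps by two staged passes with no stacks
-- and no dict: a validation pass recording per-type prefix balances, then a per-position pass that
-- finds each bracket's partner by a closed-form balance rule; objective: alternative.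
-- Both Pythons raise DotBracketError on malformed input; those inputs are outside Pre_ and both
-- ports return "" there.

-- ===== PORT A =====
-- the four bracket types (also used by Pre_)
def pvBrk : List (Char × Char) := [('(', ')'), ('[', ']'), ('{', '}'), ('<', '>')]
def pvIsOpen (c : Char) : Bool := c = '(' || c = '[' || c = '{' || c = '<'
def pvIsClose (c : Char) : Bool := c = ')' || c = ']' || c = '}' || c = '>'
def pvOpenOf (c : Char) : Char :=
  if c = ')' then '(' else if c = ']' then '[' else if c = '}' then '{' else '<'
-- Python's `stacks` dict has the four FIXED keys '(' '[' '{' '<'; ported as a 4-tuple selected by key char.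
abbrev pvStacks := List Int × List Int × List Int × List Int
def pvSGet (s : pvStacks) (o : Char) : List Int :=
  if o = '(' then s.1 else if o = '[' then s.2.1 else if o = '{' then s.2.2.1 else s.2.2.2
def pvSSet (s : pvStacks) (o : Char) (l : List Int) : pvStacks :=
  if o = '(' then (l, s.2.1, s.2.2.1, s.2.2.2)
  else if o = '[' then (s.1, l, s.2.2.1, s.2.2.2)
  else if o = '{' then (s.1, s.2.1, l, s.2.2.2)
  else (s.1, s.2.1, s.2.2.1, l)
def pvLeftover (stk : pvStacks) : Bool :=
  !stk.1.isEmpty || !stk.2.1.isEmpty || !stk.2.2.1.isEmpty || !stk.2.2.2.isEmpty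

-- loop body of parse_dotbracket_pairs; the Bool flag is the raised-DotBracketError state
def pvStepA (st : pvStacks × PySem.Dict Int Int × Bool) (ic : Int × Char) :
    pvStacks × PySem.Dict Int Int × Bool :=
  if st.2.2 then st
  else if pvIsOpen ic.2 then
    (pvSSet st.1 ic.2 (pvSGet st.1 ic.2 ++ [ic.1]), st.2.1, false)       -- stacks[ch].append(i)
  else if pvIsClose ic.2 then
    let op := pvOpenOf ic.2
    let s := pvSGet st.1 op
    if s.isEmpty then (st.1, st.2.1, true)                               -- raise: extra closing
    else
      let j := s.getLast?.getD 0                                         -- j = stacks[op].pop()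
      (pvSSet st.1 op s.dropLast, (st.2.1.insert ic.1 j).insert j ic.1, false)
  else if ic.2 = '.' then st
  else (st.1, st.2.1, true)                                              -- raise: unsupported char

def mask_ss (ss : String) (indices : List Int) : String :=
  let keep : PySem.Set Int := PySem.Set.ofList indices
  let cs := ss.toList
  let r := (PySem.List.enumerate cs 0).foldl pvStepA (([], [], [], []), PySem.Dict.empty, false)
  if r.2.2 || pvLeftover r.1 then ""                                     -- DotBracketError modeled as ""
  else
    -- first blank everything outside  (ss_list[i] = '.' if i not in keep)
    let ssl := (PySem.List.enumerate cs 0).map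
      (fun p => if PySem.Set.contains keep p.1 then p.2 else '.')
    -- then fix broken pairs inside crop
    String.ofList (r.2.1.items.foldl (fun l p =>
      if p.1 < p.2 then
        if Bool.xor (PySem.Set.contains keep p.1) (PySem.Set.contains keep p.2) then
          PySem.List.pySetD (PySem.List.pySetD l p.1 '.') p.2 '.'
        else l
      else l) ssl)

-- ===== PORT B =====
-- Source B's `opens` / `closes` strings
def pvOpens : List Char := ['(', '[', '{', '<']
def pvCloses : List Char := [')', ']', '}', '>']
-- one row of Source B's balance table (a Python list [b0, b1, b2, b3]) selected by type index
abbrev pvRow := Int × Int × Int × Int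
def pvRowGet (r : pvRow) (t : Nat) : Int :=
  if t = 0 then r.1 else if t = 1 then r.2.1 else if t = 2 then r.2.2.1 else r.2.2.2
def pvRowSet (r : pvRow) (t : Nat) (v : Int) : pvRow :=
  if t = 0 then (v, r.2.1, r.2.2.1, r.2.2.2)
  else if t = 1 then (r.1, v, r.2.2.1, r.2.2.2)
  else if t = 2 then (r.1, r.2.1, v, r.2.2.2)
  else (r.1, r.2.1, r.2.2.1, v)

-- pass-1 loop body: extend the balance table by one row (Bool = raised DotBracketError)
def pvBalStep (st : List pvRow × Bool) (c : Char) : List pvRow × Bool :=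
  if st.2 then st
  else
    let cur := st.1.getLast?.getD (0, 0, 0, 0)                           -- cur = list(bal[-1])
    match pvOpens.idxOf? c with
    | some t => (st.1 ++ [pvRowSet cur t (pvRowGet cur t + 1)], false)
    | none =>
      match pvCloses.idxOf? c with
      | some t =>
          if pvRowGet cur t = 0 then (st.1, true)                        -- raise: extra closing
          else (st.1 ++ [pvRowSet cur t (pvRowGet cur t - 1)], false)
      | none =>
          if c = '.' then (st.1 ++ [cur], false) else (st.1, true)       -- raise: unsupported char

-- pass-2 body: the closed-form partner of the bracket at position k (next(...) / max(...) in Source B;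
-- the .getD 0 arms are the unreachable-after-validation StopIteration/ValueError)
def pvPartner (cs : List Char) (bal : List pvRow) (k : Nat) (c : Char) : Nat :=
  match pvOpens.idxOf? c with
  | some t =>
      ((List.range' (k + 1) (cs.length - (k + 1))).find? (fun j =>
          cs.getD j ' ' == pvCloses.getD t ' ' &&
          pvRowGet (bal.getD j (0, 0, 0, 0)) t == pvRowGet (bal.getD k (0, 0, 0, 0)) t + 1)).getD 0
  | none =>
      let t := (pvCloses.idxOf? c).getD 0
      (((List.range k).filter (fun i =>
          cs.getD i ' ' == pvOpens.getD t ' ' &&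
          pvRowGet (bal.getD i (0, 0, 0, 0)) t == pvRowGet (bal.getD k (0, 0, 0, 0)) t - 1)).max?).getD 0

def mask_ss_alt (ss : String) (indices : List Int) : String :=
  let keep : PySem.Set Int := PySem.Set.ofList indices
  let cs := ss.toList
  let v := cs.foldl pvBalStep ([(0, 0, 0, 0)], false)                    -- pass 1
  let last := v.1.getLast?.getD (0, 0, 0, 0)                             -- bal[n]
  if v.2 || !(pvRowGet last 0 == 0 && pvRowGet last 1 == 0 &&
              pvRowGet last 2 == 0 && pvRowGet last 3 == 0)
  then ""                                                                -- DotBracketError modeled as ""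
  else
    String.ofList ((List.range cs.length).map (fun k =>                  -- pass 2
      let c := cs.getD k '.'
      if c = '.' then '.'
      else if PySem.Set.contains keep (k : Int) &&
              PySem.Set.contains keep ((pvPartner cs v.1 k c : Nat) : Int) then c else '.'))

-- ===== PRECONDITION & SPEC =====
-- Pre_ = exactly the inputs on which the Python A returns: the dot-bracket string is over
-- ".()[]{}<>" and balanced per bracket type. On all other inputs A raises DotBracketError
-- (and so does B), so Pre_ excludes no input on which A returns a value.
def Pre_mask_ss (ss : String) (indices : List Int) : Prop :=
  (ss.toList.all (fun c => c ∈ ['.', '(', ')', '[', ']', '{', '}', '<', '>']) = true) ∧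
  (ss.toList.inits.all (fun p => pvBrk.all (fun oc => p.count oc.2 ≤ p.count oc.1)) = true) ∧
  (pvBrk.all (fun oc => ss.toList.count oc.2 == ss.toList.count oc.1) = true)
instance (ss : String) (indices : List Int) : Decidable (Pre_mask_ss ss indices) := by
  unfold Pre_mask_ss; infer_instance
def pvWitness_mask_ss : String × List Int := ("([.])<>", [0, 2, 4, 5, 6])
def Spec_mask_ss (ss : String) (indices : List Int) (out : String) : Prop := out = mask_ss_alt ss indices
instance (ss : String) (indices : List Int) (out : String) : Decidable (Spec_mask_ss ss indices out) := by
  unfold Spec_mask_ss; infer_instance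

-- ===== CLAIM (what is proved, stated in full; the proofs are below) =====
def Claim_equal_mask_ss : Prop := ∀ (ss : String) (indices : List Int), Dom_mask_ss ss indices → Pre_mask_ss ss indices → Spec_mask_ss ss indices (mask_ss ss indices)

-- ===== LEMMAS AND PROOFS =====

-- per-type prefix balance: opens minus closes of type oc among the first k characters
def pvBalT (cs : List Char) (oc : Char × Char) (k : Nat) : Int :=
  ((cs.take k).count oc.1 : Int) - ((cs.take k).count oc.2 : Int)

-- the row Source B's table holds at index k
def pvRowAt (cs : List Char) (k : Nat) : pvRow :=
  (pvBalT cs ('(', ')') k, pvBalT cs ('[', ']') k,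
   pvBalT cs ('{', '}') k, pvBalT cs ('<', '>') k)

-- the type index of a bracket pair in opens/closes
def pvT (oc : Char × Char) : Nat :=
  if oc.1 = '(' then 0 else if oc.1 = '[' then 1 else if oc.1 = '{' then 2 else 3

-- "no balance of type oc returns to the level it had at a, anywhere in (a, m]"
def pvGap (cs : List Char) (oc : Char × Char) (a m : Nat) : Prop :=
  ∀ k : Nat, a < k → k ≤ m → pvBalT cs oc a < pvBalT cs oc k

-- A's pairs dict contents: each matched pair (open j, close i) contributes [(i, j), (j, i)]
def pvPairsOf (M : List (Int × Int)) : List (Int × Int) :=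
  M.flatMap (fun p => [(p.2, p.1), (p.1, p.2)])

def pvFlat (M : List (Int × Int)) : List Int := M.flatMap (fun p => [p.1, p.2])

-- all indices currently sitting in a stack or already matched, as a multiset
def pvMS (stk : pvStacks) (M : List (Int × Int)) : Multiset Int :=
  ↑stk.1 + ↑stk.2.1 + ↑stk.2.2.1 + ↑stk.2.2.2 + ↑(pvFlat M)

-- the matched-pairs record: endpoints, characters, balance relation and the gap property
def pvMOk2 (cs : List Char) (m : Nat) (M : List (Int × Int)) : Prop :=
  ∀ p ∈ M, ∃ oc ∈ pvBrk, ∃ a b : Nat, p.1 = (a : Int) ∧ p.2 = (b : Int) ∧ a < b ∧ b < m ∧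
    cs[a]? = some oc.1 ∧ cs[b]? = some oc.2 ∧
    pvBalT cs oc b = pvBalT cs oc a + 1 ∧ pvGap cs oc a b

-- per-type stack contents: element at stack index q is an unmatched open with balance q
def pvStk1 (cs : List Char) (m : Nat) (oc : Char × Char) (S : List Int) : Prop :=
  (∀ (q : Nat) (x : Int), S[q]? = some x →
     ∃ a : Nat, x = (a : Int) ∧ a < m ∧ cs[a]? = some oc.1 ∧
       pvBalT cs oc a = (q : Int) ∧ pvGap cs oc a m) ∧
  ((S.length : Int) = pvBalT cs oc m)

def pvInv (cs : List Char) (m : Nat) (stk : pvStacks) (M : List (Int × Int)) : Prop :=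
  (∀ oc ∈ pvBrk, pvStk1 cs m oc (pvSGet stk oc.1)) ∧
  pvMOk2 cs m M ∧
  (pvMS stk M).Nodup ∧
  (∀ x ∈ pvMS stk M, ∃ a : Nat, x = (a : Int) ∧ a < m) ∧
  (∀ k : Nat, k < m → cs.getD k '.' = '.' ∨ (k : Int) ∈ pvMS stk M)

lemma pvInsertFresh (l : List (Int × Int)) (k v : Int) (h : ∀ p ∈ l, p.1 ≠ k) :
    (PySem.Dict.mk l).insert k v = PySem.Dict.mk (l ++ [(k, v)]) := by
  have hc : ((PySem.Dict.mk l).contains k) = false := by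
    simp [PySem.Dict.contains_mk]
    intro a b hab
    exact h (a, b) hab
  have hi := PySem.Dict.items_insert_of_not_contains (d := PySem.Dict.mk l) (k := k) (v := v)
    (by simp [hc])
  calc (PySem.Dict.mk l).insert k v
      = PySem.Dict.mk (((PySem.Dict.mk l).insert k v).items) := rfl
    _ = PySem.Dict.mk (l ++ [(k, v)]) := by rw [hi]

lemma pvMemFlat (M : List (Int × Int)) (p : Int × Int) (hp : p ∈ M) (x : Int)
    (h : p.1 = x ∨ p.2 = x) : x ∈ pvFlat M := by
  have hx : x ∈ [p.1, p.2] := by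
    rcases h with h | h
    · simp [h.symm]
    · simp [h.symm]
  rw [pvFlat]
  exact List.mem_flatMap.2 ⟨p, hp, hx⟩

lemma pvMem_pairsOf_flat (M : List (Int × Int)) (p : Int × Int) (hp : p ∈ pvPairsOf M) :
    p.1 ∈ pvFlat M := by
  rw [pvPairsOf] at hp
  obtain ⟨q, hq, hmem⟩ := List.mem_flatMap.1 hp
  have : p = (q.2, q.1) ∨ p = (q.1, q.2) := by simpa using hmem
  rcases this with rfl | rfl
  · exact pvMemFlat M q hq q.2 (Or.inr rfl)
  · exact pvMemFlat M q hq q.1 (Or.inl rfl)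

lemma pvFlatMem (M : List (Int × Int)) (x : Int) (hx : x ∈ pvFlat M) :
    ∃ p ∈ M, p.1 = x ∨ p.2 = x := by
  rw [pvFlat] at hx
  obtain ⟨p, hp, hin⟩ := List.mem_flatMap.1 hx
  refine ⟨p, hp, ?_⟩
  rcases (by simpa using hin : x = p.1 ∨ x = p.2) with h | h
  · exact Or.inl h.symm
  · exact Or.inr h.symm

lemma pvSGet_SSet_self (stk : pvStacks) (oc : Char × Char) (hoc : oc ∈ pvBrk) (l : List Int) :
    pvSGet (pvSSet stk oc.1 l) oc.1 = l := by
  fin_cases hoc <;> simp [pvSGet, pvSSet]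

lemma pvSGet_SSet_ne (stk : pvStacks) (oc oc' : Char × Char) (hoc : oc ∈ pvBrk)
    (hoc' : oc' ∈ pvBrk) (hne : oc' ≠ oc) (l : List Int) :
    pvSGet (pvSSet stk oc.1 l) oc'.1 = pvSGet stk oc'.1 := by
  fin_cases hoc <;> fin_cases hoc' <;> simp_all [pvSGet, pvSSet]

lemma pvMS_push (stk : pvStacks) (M : List (Int × Int)) (oc : Char × Char) (hoc : oc ∈ pvBrk)
    (x : Int) :
    pvMS (pvSSet stk oc.1 (pvSGet stk oc.1 ++ [x])) M = pvMS stk M + {x} := by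
  fin_cases hoc <;>
  (simp [pvMS, pvSGet, pvSSet]
   rw [Multiset.ext]; intro a
   by_cases hx : x = a <;>
     simp [List.count_append, List.count_cons, hx, fun p => (eq_comm : (a = p) ↔ _)] <;> omega)

lemma pvMS_pop (stk : pvStacks) (M : List (Int × Int)) (oc : Char × Char) (hoc : oc ∈ pvBrk)
    (S' : List Int) (j x : Int) (hget : pvSGet stk oc.1 = S' ++ [j]) :
    pvMS (pvSSet stk oc.1 S') (M ++ [(j, x)]) = pvMS stk M + {x} := by
  fin_cases hoc <;>
  (simp [pvSGet] at hget
   simp [pvMS, pvFlat, pvSSet, hget]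
   rw [Multiset.ext]; intro a
   by_cases hx : x = a <;> by_cases hj : j = a <;>
     simp [List.count_append, List.count_cons, hx, hj, fun p => (eq_comm : (a = p) ↔ _)] <;> omega)

-- step-shape lemmas for A's loop body
lemma pvStepA_open (stk : pvStacks) (prs : PySem.Dict Int Int) (i : Int) (c : Char)
    (hc : pvIsOpen c = true) :
    pvStepA (stk, prs, false) (i, c) = (pvSSet stk c (pvSGet stk c ++ [i]), prs, false) := by
  simp [pvStepA, hc]

lemma pvStepA_close (stk : pvStacks) (prs : PySem.Dict Int Int) (i : Int) (c : Char)
    (hc : pvIsClose c = true) (hno : pvIsOpen c = false) (hS : pvSGet stk (pvOpenOf c) ≠ []) :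
    pvStepA (stk, prs, false) (i, c) =
      (pvSSet stk (pvOpenOf c) (pvSGet stk (pvOpenOf c)).dropLast,
       (prs.insert i ((pvSGet stk (pvOpenOf c)).getLast hS)).insert
         ((pvSGet stk (pvOpenOf c)).getLast hS) i, false) := by
  have hgl : (pvSGet stk (pvOpenOf c)).getLast?.getD 0 = (pvSGet stk (pvOpenOf c)).getLast hS := by
    rw [List.getLast?_eq_some_getLast (h := hS)]; rfl
  simp [pvStepA, hc, hno, hS, hgl]

lemma pvStepA_dot (stk : pvStacks) (prs : PySem.Dict Int Int) (i : Int) :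
    pvStepA (stk, prs, false) (i, '.') = (stk, prs, false) := by
  simp [pvStepA, pvIsOpen, pvIsClose]

-- no entry of M mentions x when x is not among M's indices
lemma pvAnyNotMem (M : List (Int × Int)) (x : Int) (hx : x ∉ pvFlat M)
    (g : Int × Int → Bool) :
    M.any (fun p => (p.1 == x || p.2 == x) && g p) = false := by
  simp only [List.any_eq_false]
  intro p hp
  simp only [Bool.and_eq_true, Bool.or_eq_true, beq_iff_eq, not_and, Bool.not_eq_true]
  intro hmem
  exact absurd (pvMemFlat M p hp x hmem) hx

-- the unique entry mentioning x decides any `mentions x && g` scan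
lemma pvUniqueMatch (M : List (Int × Int)) (hnd : (pvFlat M).Nodup) (x : Int)
    (p : Int × Int) (hp : p ∈ M) (hx : p.1 = x ∨ p.2 = x) (g : Int × Int → Bool) :
    M.any (fun q => (q.1 == x || q.2 == x) && g q) = g p := by
  induction M with
  | nil => cases hp
  | cons r rest ih =>
    have hflatcons : pvFlat (r :: rest) = r.1 :: r.2 :: pvFlat rest := by
      simp [pvFlat]
    rw [hflatcons] at hnd
    have h1 : r.1 ∉ (r.2 :: pvFlat rest) := (List.nodup_cons.1 hnd).1
    have hnd2 := (List.nodup_cons.1 hnd).2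
    have h2 : r.2 ∉ pvFlat rest := (List.nodup_cons.1 hnd2).1
    have hndr : (pvFlat rest).Nodup := (List.nodup_cons.1 hnd2).2
    rcases List.mem_cons.1 hp with rfl | hp'
    · have hxrest : x ∉ pvFlat rest := by
        intro hmem
        rcases hx with h | h
        · exact h1 (h ▸ List.mem_cons_of_mem _ hmem)
        · exact h2 (h ▸ hmem)
      simp only [List.any_cons]
      rw [pvAnyNotMem rest x hxrest g]
      have hm : (p.1 == x || p.2 == x) = true := by
        rcases hx with h | h <;> simp [h]
      simp [hm]
    · have hxflat : x ∈ pvFlat rest := pvMemFlat rest p hp' x hx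
      have hr : (r.1 == x || r.2 == x) = false := by
        have hr1 : r.1 ≠ x := by
          rintro rfl
          exact h1 (List.mem_cons_of_mem _ hxflat)
        have hr2 : r.2 ≠ x := by
          rintro rfl
          exact h2 hxflat
        simp [hr1, hr2]
      simp only [List.any_cons]
      rw [hr]
      simp only [Bool.false_and, Bool.false_or]
      exact ih hndr hp'

-- a stack member is disjoint from matched indices
lemma pvStackFlatDisj (stk : pvStacks) (M : List (Int × Int)) (hnd : (pvMS stk M).Nodup)
    (oc : Char × Char) (hoc : oc ∈ pvBrk) (j : Int) (hj : j ∈ pvSGet stk oc.1) :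
    j ∉ pvFlat M := by
  intro hflat
  have hle := Multiset.nodup_iff_count_le_one.1 hnd j
  have c2 := List.count_pos_iff.2 hflat
  fin_cases hoc <;>
  (simp [pvSGet] at hj
   simp only [pvMS, Multiset.count_add, Multiset.coe_count] at hle
   have c1 := List.count_pos_iff.2 hj
   omega)

lemma pvOpenOfClose (oc : Char × Char) (hoc : oc ∈ pvBrk) : pvOpenOf oc.2 = oc.1 := by
  fin_cases hoc <;> rfl

lemma pvIsCloseClose (oc : Char × Char) (hoc : oc ∈ pvBrk) : pvIsClose oc.2 = true := by
  fin_cases hoc <;> rfl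

lemma pvIsOpenOpen (oc : Char × Char) (hoc : oc ∈ pvBrk) : pvIsOpen oc.1 = true := by
  fin_cases hoc <;> rfl

lemma pvIsOpenClose (oc : Char × Char) (hoc : oc ∈ pvBrk) : pvIsOpen oc.2 = false := by
  fin_cases hoc <;> rfl

lemma pvOpen_ne_close (oc oc' : Char × Char) (h : oc ∈ pvBrk) (h' : oc' ∈ pvBrk) :
    oc.1 ≠ oc'.2 := by
  fin_cases h <;> fin_cases h' <;> decide

lemma pvOpen_ne_dot (oc : Char × Char) (h : oc ∈ pvBrk) : oc.1 ≠ '.' := by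
  fin_cases h <;> decide

lemma pvClose_ne_dot (oc : Char × Char) (h : oc ∈ pvBrk) : oc.2 ≠ '.' := by
  fin_cases h <;> decide

lemma pvFstInj (oc oc' : Char × Char) (h : oc ∈ pvBrk) (h' : oc' ∈ pvBrk)
    (he : oc.1 = oc'.1) : oc = oc' := by
  fin_cases h <;> fin_cases h' <;> simp_all

lemma pvSndInj (oc oc' : Char × Char) (h : oc ∈ pvBrk) (h' : oc' ∈ pvBrk)
    (he : oc.2 = oc'.2) : oc = oc' := by
  fin_cases h <;> fin_cases h' <;> simp_all

lemma pvFlatSubMS (stk : pvStacks) (M : List (Int × Int)) (x : Int) (hx : x ∈ pvFlat M) :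
    x ∈ pvMS stk M := by
  rw [pvMS]
  exact Multiset.mem_add.2 (Or.inr (by exact_mod_cast hx))

lemma pvCharCases (c : Char) (h : c ∈ ['.', '(', ')', '[', ']', '{', '}', '<', '>']) :
    c = '.' ∨ (∃ oc ∈ pvBrk, c = oc.1) ∨ (∃ oc ∈ pvBrk, c = oc.2) := by
  fin_cases h
  · exact Or.inl rfl
  · exact Or.inr (Or.inl ⟨('(', ')'), by decide, rfl⟩)
  · exact Or.inr (Or.inr ⟨('(', ')'), by decide, rfl⟩)
  · exact Or.inr (Or.inl ⟨('[', ']'), by decide, rfl⟩)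
  · exact Or.inr (Or.inr ⟨('[', ']'), by decide, rfl⟩)
  · exact Or.inr (Or.inl ⟨('{', '}'), by decide, rfl⟩)
  · exact Or.inr (Or.inr ⟨('{', '}'), by decide, rfl⟩)
  · exact Or.inr (Or.inl ⟨('<', '>'), by decide, rfl⟩)
  · exact Or.inr (Or.inr ⟨('<', '>'), by decide, rfl⟩)

-- one-step change of a prefix balance
lemma pvBalT_succ (cs : List Char) (oc : Char × Char) (m : Nat) (c : Char)
    (h : cs[m]? = some c) :
    pvBalT cs oc (m + 1) =
      pvBalT cs oc m + ((if c = oc.1 then 1 else 0) - (if c = oc.2 then 1 else 0)) := by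
  have ht : cs.take (m + 1) = cs.take m ++ [c] := by
    rw [List.take_succ, h]; rfl
  have cnt : ∀ a : Char, (([c].count a) : Int) = if c = a then 1 else 0 := by
    intro a
    by_cases hca : c = a <;> simp [hca, List.count_singleton, eq_comm]
  rw [pvBalT, pvBalT, ht]
  push_cast [List.count_append]
  rw [cnt oc.1, cnt oc.2]
  ring

lemma pvBalT_succ_open (cs : List Char) (oc oc' : Char × Char) (hoc : oc ∈ pvBrk)
    (hoc' : oc' ∈ pvBrk) (m : Nat) (h : cs[m]? = some oc.1) :
    pvBalT cs oc' (m + 1) = pvBalT cs oc' m + (if oc' = oc then 1 else 0) := by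
  fin_cases hoc <;> fin_cases hoc' <;> (rw [pvBalT_succ cs _ m _ h]; simp; try ring)

lemma pvBalT_succ_close (cs : List Char) (oc oc' : Char × Char) (hoc : oc ∈ pvBrk)
    (hoc' : oc' ∈ pvBrk) (m : Nat) (h : cs[m]? = some oc.2) :
    pvBalT cs oc' (m + 1) = pvBalT cs oc' m - (if oc' = oc then 1 else 0) := by
  fin_cases hoc <;> fin_cases hoc' <;> (rw [pvBalT_succ cs _ m _ h]; simp; try ring)

lemma pvBalT_succ_dot (cs : List Char) (oc : Char × Char) (hoc : oc ∈ pvBrk) (m : Nat)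
    (h : cs[m]? = some '.') :
    pvBalT cs oc (m + 1) = pvBalT cs oc m := by
  fin_cases hoc <;> (rw [pvBalT_succ cs _ m _ h]; simp; try ring)

-- at a closing character, the prefix-balance of its type is positive (from Pre_'s prefix condition)
lemma pvBalPos (cs : List Char) (oc : Char × Char) (hoc : oc ∈ pvBrk) (m : Nat)
    (hcm : cs[m]? = some oc.2)
    (hinits : ∀ p ∈ cs.inits, ∀ oc' ∈ pvBrk, p.count oc'.2 ≤ p.count oc'.1) :
    1 ≤ pvBalT cs oc m := by
  have hpre := hinits (cs.take (m + 1)) (by rw [List.mem_inits]; exact List.take_prefix _ _) oc hoc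
  have ht : cs.take (m + 1) = cs.take m ++ [oc.2] := by
    rw [List.take_succ, hcm]; rfl
  rw [ht, List.count_append, List.count_append] at hpre
  have hne : oc.1 ≠ oc.2 := by fin_cases hoc <;> decide
  rw [pvBalT]
  simp [List.count_singleton, Ne.symm hne] at hpre
  omega

-- ===== invariant preservation =====
lemma pvInvDot (cs : List Char) (m : Nat) (stk : pvStacks) (M : List (Int × Int))
    (hm : m < cs.length) (hcm : cs[m]? = some '.')
    (hInv : pvInv cs m stk M) : pvInv cs (m + 1) stk M := by
  obtain ⟨hS, hMOk, hnd, hbd, hcov⟩ := hInv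
  refine ⟨?_, ?_, hnd, ?_, ?_⟩
  · intro oc hoc
    obtain ⟨h1, h2⟩ := hS oc hoc
    refine ⟨fun q x hx => ?_, ?_⟩
    · obtain ⟨a, ha1, ha2, ha3, ha4, ha5⟩ := h1 q x hx
      refine ⟨a, ha1, Nat.lt_succ_of_lt ha2, ha3, ha4, fun k hk1 hk2 => ?_⟩
      rcases Nat.lt_succ_iff_lt_or_eq.1 (Nat.lt_succ_of_le hk2) with hk' | rfl
      · exact ha5 k hk1 (by omega)
      · rw [pvBalT_succ_dot cs oc hoc m hcm]
        exact ha5 m (by omega) (le_refl m)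
    · rw [pvBalT_succ_dot cs oc hoc m hcm]; exact h2
  · intro p hp
    obtain ⟨oc, hoc, a, b, h1, h2, h3, h4, h5, h6, h7, h8⟩ := hMOk p hp
    exact ⟨oc, hoc, a, b, h1, h2, h3, Nat.lt_succ_of_lt h4, h5, h6, h7, h8⟩
  · intro x hx
    obtain ⟨a, ha1, ha2⟩ := hbd x hx
    exact ⟨a, ha1, Nat.lt_succ_of_lt ha2⟩
  · intro k hk
    rcases Nat.lt_succ_iff_lt_or_eq.1 hk with hk' | rfl
    · exact hcov k hk'
    · left
      rw [List.getD_eq_getElem?_getD, hcm]; rfl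

lemma pvInvPush (cs : List Char) (m : Nat) (stk : pvStacks) (M : List (Int × Int))
    (oc : Char × Char) (hoc : oc ∈ pvBrk) (hm : m < cs.length) (hcm : cs[m]? = some oc.1)
    (hInv : pvInv cs m stk M) :
    pvInv cs (m + 1) (pvSSet stk oc.1 (pvSGet stk oc.1 ++ [(m : Int)])) M := by
  obtain ⟨hS, hMOk, hnd, hbd, hcov⟩ := hInv
  have hms := pvMS_push stk M oc hoc (m : Int)
  have hmfresh : ((m : Int)) ∉ pvMS stk M := by
    intro hmem
    obtain ⟨a, ha1, ha2⟩ := hbd _ hmem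
    have : m = a := by exact_mod_cast ha1
    omega
  refine ⟨?_, ?_, ?_, ?_, ?_⟩
  · intro oc' hoc'
    obtain ⟨h1, h2⟩ := hS oc' hoc'
    have hgapext : ∀ a : Nat, a < m → pvGap cs oc' a m → pvGap cs oc' a (m + 1) := by
      intro a ham hga k hk1 hk2
      rcases Nat.lt_succ_iff_lt_or_eq.1 (Nat.lt_succ_of_le hk2) with hk' | rfl
      · exact hga k hk1 (by omega)
      · rw [pvBalT_succ_open cs oc oc' hoc hoc' m hcm]
        have := hga m ham (le_refl m)
        split_ifs <;> omega
    by_cases he : oc' = oc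
    · subst he
      rw [pvSGet_SSet_self _ _ hoc']
      refine ⟨fun q x hx => ?_, ?_⟩
      · rcases Nat.lt_or_ge q (pvSGet stk oc'.1).length with hq | hq
        · rw [List.getElem?_append_left hq] at hx
          obtain ⟨a, ha1, ha2, ha3, ha4, ha5⟩ := h1 q x hx
          exact ⟨a, ha1, Nat.lt_succ_of_lt ha2, ha3, ha4, hgapext a ha2 ha5⟩
        · rw [List.getElem?_append_right hq] at hx
          have hq' : q = (pvSGet stk oc'.1).length := by
            by_contra hne
            have : q - (pvSGet stk oc'.1).length ≥ 1 := by omega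
            simp [List.getElem?_eq_none (l := [(m : Int)]) (by simpa using this)] at hx
          subst hq'
          simp at hx
          refine ⟨m, hx.symm, Nat.lt_succ_self m, hcm, by rw [← h2], ?_⟩
          intro k hk1 hk2
          have hk' : k = m + 1 := by omega
          subst hk'
          rw [pvBalT_succ_open cs oc' oc' hoc' hoc' m hcm]
          simp
      · rw [pvBalT_succ_open cs oc' oc' hoc' hoc' m hcm]
        simp [← h2]
    · rw [pvSGet_SSet_ne _ _ _ hoc hoc' he]
      refine ⟨fun q x hx => ?_, ?_⟩
      · obtain ⟨a, ha1, ha2, ha3, ha4, ha5⟩ := h1 q x hx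
        exact ⟨a, ha1, Nat.lt_succ_of_lt ha2, ha3, ha4, hgapext a ha2 ha5⟩
      · rw [pvBalT_succ_open cs oc oc' hoc hoc' m hcm, if_neg he]
        simpa using h2
  · intro p hp
    obtain ⟨oc', hoc', a, b, h1, h2, h3, h4, h5, h6, h7, h8⟩ := hMOk p hp
    exact ⟨oc', hoc', a, b, h1, h2, h3, Nat.lt_succ_of_lt h4, h5, h6, h7, h8⟩
  · rw [hms, Multiset.nodup_add]
    exact ⟨hnd, Multiset.nodup_singleton _, by simpa using hmfresh⟩
  · intro x hx
    rw [hms] at hx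
    rcases Multiset.mem_add.1 hx with hx' | hx'
    · obtain ⟨a, ha1, ha2⟩ := hbd x hx'
      exact ⟨a, ha1, Nat.lt_succ_of_lt ha2⟩
    · exact ⟨m, by simpa using hx', Nat.lt_succ_self m⟩
  · intro k hk
    rw [hms]
    rcases Nat.lt_succ_iff_lt_or_eq.1 hk with hk' | rfl
    · rcases hcov k hk' with h | h
      · exact Or.inl h
      · exact Or.inr (Multiset.mem_add.2 (Or.inl h))
    · exact Or.inr (Multiset.mem_add.2 (Or.inr (Multiset.mem_singleton.2 rfl)))

lemma pvInvPop (cs : List Char) (m : Nat) (stk : pvStacks) (M : List (Int × Int))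
    (oc : Char × Char) (hoc : oc ∈ pvBrk) (hm : m < cs.length) (hcm : cs[m]? = some oc.2)
    (hInv : pvInv cs m stk M) (hSne : pvSGet stk oc.1 ≠ []) :
    pvInv cs (m + 1) (pvSSet stk oc.1 (pvSGet stk oc.1).dropLast)
      (M ++ [((pvSGet stk oc.1).getLast hSne, (m : Int))]) := by
  obtain ⟨hS, hMOk, hnd, hbd, hcov⟩ := hInv
  have hlen1 : 1 ≤ (pvSGet stk oc.1).length := List.length_pos_iff.2 hSne
  have hq0 : (pvSGet stk oc.1)[(pvSGet stk oc.1).length - 1]? =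
      some ((pvSGet stk oc.1).getLast hSne) := by
    rw [List.getLast_eq_getElem, List.getElem?_eq_getElem]
  obtain ⟨a0, ha01, ha02, ha03, ha04, ha05⟩ := (hS oc hoc).1 _ _ hq0
  have hlenbal := (hS oc hoc).2
  have hbalm : pvBalT cs oc m = pvBalT cs oc a0 + 1 := by
    rw [ha04, ← hlenbal]
    push_cast [hlen1]
    omega
  have hms := pvMS_pop stk M oc hoc (pvSGet stk oc.1).dropLast _ ((m : Int))
    (List.dropLast_concat_getLast hSne).symm
  have hmfresh : ((m : Int)) ∉ pvMS stk M := by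
    intro hmem
    obtain ⟨a, ha1, ha2⟩ := hbd _ hmem
    have : m = a := by exact_mod_cast ha1
    omega
  refine ⟨?_, ?_, ?_, ?_, ?_⟩
  · intro oc' hoc'
    obtain ⟨h1, h2⟩ := hS oc' hoc'
    have hgapext : ∀ a : Nat, a < m → (pvBalT cs oc' a < pvBalT cs oc' (m+1)) →
        pvGap cs oc' a m → pvGap cs oc' a (m + 1) := by
      intro a ham hlast hga k hk1 hk2
      rcases Nat.lt_succ_iff_lt_or_eq.1 (Nat.lt_succ_of_le hk2) with hk' | rfl
      · exact hga k hk1 (by omega)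
      · exact hlast
    by_cases he : oc' = oc
    · subst he
      rw [pvSGet_SSet_self _ _ hoc']
      have hbalm1 : pvBalT cs oc' (m + 1) = pvBalT cs oc' m - 1 := by
        rw [pvBalT_succ_close cs oc' oc' hoc' hoc' m hcm]; simp
      refine ⟨fun q x hx => ?_, ?_⟩
      · have hqlt : q < (pvSGet stk oc'.1).dropLast.length := by
          by_contra hge
          rw [List.getElem?_eq_none (by omega)] at hx
          cases hx
        have hx' : (pvSGet stk oc'.1)[q]? = some x := by
          rw [← hx]
          rw [List.getElem?_eq_getElem (l := (pvSGet stk oc'.1).dropLast) hqlt,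
            List.getElem?_eq_getElem (by simp at hqlt; omega)]
          simp [List.getElem_dropLast]
        obtain ⟨a, ha1, ha2, ha3, ha4, ha5⟩ := h1 q x hx'
        refine ⟨a, ha1, Nat.lt_succ_of_lt ha2, ha3, ha4, hgapext a ha2 ?_ ha5⟩
        rw [hbalm1, ha4, ← hlenbal]
        simp at hqlt
        push_cast
        omega
      · rw [hbalm1, ← hlenbal]
        simp [hlen1]
    · rw [pvSGet_SSet_ne _ _ _ hoc hoc' he]
      have hbalm1 : pvBalT cs oc' (m + 1) = pvBalT cs oc' m := by
        rw [pvBalT_succ_close cs oc oc' hoc hoc' m hcm, if_neg he]; ring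
      refine ⟨fun q x hx => ?_, ?_⟩
      · obtain ⟨a, ha1, ha2, ha3, ha4, ha5⟩ := h1 q x hx
        refine ⟨a, ha1, Nat.lt_succ_of_lt ha2, ha3, ha4, hgapext a ha2 ?_ ha5⟩
        rw [hbalm1]
        exact ha5 m ha2 (le_refl m)
      · rw [hbalm1]; exact h2
  · intro p hp
    rcases List.mem_append.1 hp with hp' | hp'
    · obtain ⟨oc', hoc', a, b, h1, h2, h3, h4, h5, h6, h7, h8⟩ := hMOk p hp'
      exact ⟨oc', hoc', a, b, h1, h2, h3, Nat.lt_succ_of_lt h4, h5, h6, h7, h8⟩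
    · have hp'' : p = ((pvSGet stk oc.1).getLast hSne, (m : Int)) := by simpa using hp'
      subst hp''
      exact ⟨oc, hoc, a0, m, ha01, rfl, ha02, Nat.lt_succ_self m, ha03, hcm, hbalm.symm ▸ hbalm, ha05⟩
  · rw [hms, Multiset.nodup_add]
    exact ⟨hnd, Multiset.nodup_singleton _, by simpa using hmfresh⟩
  · intro x hx
    rw [hms] at hx
    rcases Multiset.mem_add.1 hx with hx' | hx'
    · obtain ⟨a, ha1, ha2⟩ := hbd x hx'
      exact ⟨a, ha1, Nat.lt_succ_of_lt ha2⟩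
    · exact ⟨m, by simpa using hx', Nat.lt_succ_self m⟩
  · intro k hk
    rw [hms]
    rcases Nat.lt_succ_iff_lt_or_eq.1 hk with hk' | rfl
    · rcases hcov k hk' with h | h
      · exact Or.inl h
      · exact Or.inr (Multiset.mem_add.2 (Or.inl h))
    · exact Or.inr (Multiset.mem_add.2 (Or.inr (Multiset.mem_singleton.2 rfl)))

-- dict bookkeeping for a pop: the two inserts extend pvPairsOf by the new pair
lemma pvInsPair (M : List (Int × Int)) (x y : Int) (hx : x ∉ pvFlat M) (hy : y ∉ pvFlat M)
    (hxy : x ≠ y) :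
    ((PySem.Dict.mk (pvPairsOf M)).insert y x).insert x y =
      PySem.Dict.mk (pvPairsOf (M ++ [(x, y)])) := by
  have hpf : pvPairsOf (M ++ [(x, y)]) = (pvPairsOf M ++ [(y, x)]) ++ [(x, y)] := by
    simp [pvPairsOf]
  rw [hpf]
  rw [pvInsertFresh (pvPairsOf M) _ _
    (fun p hp h => hy (by rw [← h]; exact pvMem_pairsOf_flat M p hp))]
  rw [pvInsertFresh _ _ _ ?_]
  intro p hp
  rcases List.mem_append.1 hp with hp' | hp'
  · exact fun h => hx (by rw [← h]; exact pvMem_pairsOf_flat M p hp')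
  · have hpe : p = (y, x) := by simpa using hp'
    subst hpe
    exact fun h => hxy h.symm

-- A's fold runs error-free and yields a pair record satisfying the invariant at the end
lemma pvFoldA (cs : List Char)
    (hch : ∀ c ∈ cs, c ∈ ['.', '(', ')', '[', ']', '{', '}', '<', '>'])
    (hinits : ∀ p ∈ cs.inits, ∀ oc ∈ pvBrk, p.count oc.2 ≤ p.count oc.1) :
    ∀ (suf : List Char) (m : Nat), m ≤ cs.length → cs.drop m = suf →
    ∀ stk M, pvInv cs m stk M →
    ∃ stk' M',
      (PySem.List.enumerate suf (m : Int)).foldl pvStepA (stk, PySem.Dict.mk (pvPairsOf M), false) =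
        (stk', PySem.Dict.mk (pvPairsOf M'), false) ∧
      pvInv cs cs.length stk' M' := by
  intro suf
  induction suf with
  | nil =>
    intro m hm hdrop stk M hInv
    have hml : cs.length ≤ m := List.drop_eq_nil_iff.1 hdrop
    have hmeq : m = cs.length := le_antisymm hm hml
    subst hmeq
    exact ⟨stk, M, by simp [PySem.List.enumerate_nil], hInv⟩
  | cons c rest ih =>
    intro m hm hdrop stk M hInv
    have hm' : m < cs.length := by
      have hlen := congrArg List.length hdrop
      simp [List.length_drop] at hlen
      omega
    have hcm : cs[m]? = some c := by
      have h0 : (cs.drop m)[0]? = some c := by rw [hdrop]; rfl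
      rw [List.getElem?_drop] at h0
      simpa using h0
    have hdrop' : cs.drop (m + 1) = rest := by
      have h1 : (cs.drop m).drop 1 = rest := by rw [hdrop]; rfl
      rw [List.drop_drop] at h1
      simpa [Nat.add_comm] using h1
    have hc : c ∈ cs := by
      have : c ∈ cs.drop m := by rw [hdrop]; exact List.mem_cons_self
      exact List.drop_subset _ _ this
    rw [PySem.List.enumerate_cons, List.foldl_cons]
    have hcast : ((m : Int) + 1) = (((m + 1 : Nat)) : Int) := by push_cast; ring
    rw [hcast]
    rcases pvCharCases c (hch c hc) with rfl | ⟨oc, hoc, rfl⟩ | ⟨oc, hoc, rfl⟩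
    · rw [pvStepA_dot]
      exact ih (m + 1) (by omega) hdrop' _ _ (pvInvDot cs m stk M hm' hcm hInv)
    · rw [pvStepA_open stk _ ((m : Nat) : Int) _ (pvIsOpenOpen oc hoc)]
      exact ih (m + 1) (by omega) hdrop' _ _ (pvInvPush cs m stk M oc hoc hm' hcm hInv)
    · -- closing bracket: the stack of its type is nonempty
      have hbal1 : 1 ≤ pvBalT cs oc m := pvBalPos cs oc hoc m hcm hinits
      have hlen := (hInv.1 oc hoc).2
      have hSne : pvSGet stk oc.1 ≠ [] := by
        intro hnil
        rw [hnil] at hlen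
        simp at hlen
        omega
      have hoo : pvOpenOf oc.2 = oc.1 := pvOpenOfClose oc hoc
      have hSeq : pvSGet stk (pvOpenOf oc.2) = pvSGet stk oc.1 := by rw [hoo]
      have hSne2 : pvSGet stk (pvOpenOf oc.2) ≠ [] := by rw [hSeq]; exact hSne
      have hgl : (pvSGet stk (pvOpenOf oc.2)).getLast hSne2 = (pvSGet stk oc.1).getLast hSne := by
        rw [List.getLast_eq_getElem, List.getLast_eq_getElem]
        apply Option.some.inj
        rw [← List.getElem?_eq_getElem, ← List.getElem?_eq_getElem, hSeq]
      have hjmem : (pvSGet stk oc.1).getLast hSne ∈ pvSGet stk oc.1 := List.getLast_mem hSne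
      have hjflat : (pvSGet stk oc.1).getLast hSne ∉ pvFlat M :=
        pvStackFlatDisj stk M hInv.2.2.1 oc hoc _ hjmem
      have hmflat : ((m : Nat) : Int) ∉ pvFlat M := by
        intro hmem
        obtain ⟨a, ha1, ha2⟩ := hInv.2.2.2.1 _ (pvFlatSubMS stk M _ hmem)
        have : m = a := by exact_mod_cast ha1
        omega
    -- the popped opening index is strictly below m
      have hlt : (pvSGet stk oc.1).getLast hSne ≠ ((m : Nat) : Int) := by
        have hq0 : (pvSGet stk oc.1)[(pvSGet stk oc.1).length - 1]? =
            some ((pvSGet stk oc.1).getLast hSne) := by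
          rw [List.getLast_eq_getElem, List.getElem?_eq_getElem]
        obtain ⟨a0, ha01, ha02, _, _, _⟩ := (hInv.1 oc hoc).1 _ _ hq0
        rw [ha01]
        intro h
        have : a0 = m := by exact_mod_cast h
        omega
      rw [pvStepA_close stk _ ((m : Nat) : Int) _ (pvIsCloseClose oc hoc)
        (pvIsOpenClose oc hoc) hSne2]
      rw [pvInsPair M _ _ (hgl ▸ hjflat) hmflat (hgl ▸ hlt), hgl, hSeq, hoo]
      exact ih (m + 1) (by omega) hdrop' _ _ (pvInvPop cs m stk M oc hoc hm' hcm hInv hSne)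

lemma pvInvInit (cs : List Char) : pvInv cs 0 ([], [], [], []) [] := by
  refine ⟨?_, ?_, ?_, ?_, ?_⟩
  · intro oc hoc
    constructor
    · intro q x hx
      fin_cases hoc <;> simp [pvSGet] at hx
    · fin_cases hoc <;> simp [pvSGet, pvBalT]
  · intro p hp
    cases hp
  · simp [pvMS, pvFlat]
  · intro x hx
    simp [pvMS, pvFlat] at hx
  · intro k hk
    omega

lemma pvT_opens (oc : Char × Char) (hoc : oc ∈ pvBrk) : pvOpens.idxOf? oc.1 = some (pvT oc) := by
  fin_cases hoc <;> decide

lemma pvT_closes (oc : Char × Char) (hoc : oc ∈ pvBrk) : pvCloses.idxOf? oc.2 = some (pvT oc) := by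
  fin_cases hoc <;> decide

lemma pvT_opens_none (oc : Char × Char) (hoc : oc ∈ pvBrk) : pvOpens.idxOf? oc.2 = none := by
  fin_cases hoc <;> decide

lemma pvT_closes_getD (oc : Char × Char) (hoc : oc ∈ pvBrk) : pvCloses.getD (pvT oc) ' ' = oc.2 := by
  fin_cases hoc <;> decide

lemma pvT_opens_getD (oc : Char × Char) (hoc : oc ∈ pvBrk) : pvOpens.getD (pvT oc) ' ' = oc.1 := by
  fin_cases hoc <;> decide

lemma pvRowGet_rowAt (cs : List Char) (j : Nat) (oc : Char × Char) (hoc : oc ∈ pvBrk) :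
    pvRowGet (pvRowAt cs j) (pvT oc) = pvBalT cs oc j := by
  fin_cases hoc <;> simp [pvRowAt, pvRowGet, pvT]

-- ===== B's balance table =====
lemma pvRowAt_succ (cs : List Char) (m : Nat) (c : Char) (h : cs[m]? = some c) :
    pvRowAt cs (m + 1) =
      (pvBalT cs ('(', ')') m + (if c = '(' then 1 else if c = ')' then -1 else 0),
       pvBalT cs ('[', ']') m + (if c = '[' then 1 else if c = ']' then -1 else 0),
       pvBalT cs ('{', '}') m + (if c = '{' then 1 else if c = '}' then -1 else 0),
       pvBalT cs ('<', '>') m + (if c = '<' then 1 else if c = '>' then -1 else 0)) := by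
  unfold pvRowAt
  rw [pvBalT_succ cs ('(', ')') m c h, pvBalT_succ cs ('[', ']') m c h,
      pvBalT_succ cs ('{', '}') m c h, pvBalT_succ cs ('<', '>') m c h]
  refine Prod.ext ?_ (Prod.ext ?_ (Prod.ext ?_ ?_)) <;> simp <;> split_ifs <;> simp_all <;> omega

lemma pvTableLast (cs : List Char) (m : Nat) :
    ((List.range (m + 1)).map (pvRowAt cs)).getLast?.getD (0, 0, 0, 0) = pvRowAt cs m := by
  rw [List.getLast?_map]
  simp [List.range_succ]

lemma pvTableAux (cs : List Char)
    (hch : ∀ c ∈ cs, c ∈ ['.', '(', ')', '[', ']', '{', '}', '<', '>'])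
    (hinits : ∀ p ∈ cs.inits, ∀ oc ∈ pvBrk, p.count oc.2 ≤ p.count oc.1) :
    ∀ (suf : List Char) (m : Nat), m ≤ cs.length → cs.drop m = suf →
    suf.foldl pvBalStep ((List.range (m + 1)).map (pvRowAt cs), false) =
      ((List.range (cs.length + 1)).map (pvRowAt cs), false) := by
  intro suf
  induction suf with
  | nil =>
    intro m hm hdrop
    have hml : cs.length ≤ m := List.drop_eq_nil_iff.1 hdrop
    have hmeq : m = cs.length := le_antisymm hm hml
    subst hmeq
    rfl
  | cons c rest ih =>
    intro m hm hdrop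
    have hm' : m < cs.length := by
      have hlen := congrArg List.length hdrop
      simp [List.length_drop] at hlen
      omega
    have hcm : cs[m]? = some c := by
      have h0 : (cs.drop m)[0]? = some c := by rw [hdrop]; rfl
      rw [List.getElem?_drop] at h0
      simpa using h0
    have hdrop' : cs.drop (m + 1) = rest := by
      have h1 : (cs.drop m).drop 1 = rest := by rw [hdrop]; rfl
      rw [List.drop_drop] at h1
      simpa [Nat.add_comm] using h1
    have hc : c ∈ cs := by
      have : c ∈ cs.drop m := by rw [hdrop]; exact List.mem_cons_self
      exact List.drop_subset _ _ this
    rw [List.foldl_cons]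
    have hlast : (Option.map (pvRowAt cs) (List.range (m + 1)).getLast?).getD (0, 0, 0, 0) =
        pvRowAt cs m := by
      simp [List.range_succ]
    have happ : (List.range (m + 1)).map (pvRowAt cs) ++ [pvRowAt cs (m + 1)] =
        (List.range (m + 1 + 1)).map (pvRowAt cs) := by
      rw [List.range_succ (n := m + 1), List.map_append]
      simp
    have hsucc := pvRowAt_succ cs m c hcm
    rcases pvCharCases c (hch c hc) with rfl | ⟨oc, hoc, rfl⟩ | ⟨oc, hoc, rfl⟩
    · -- '.'
      have e1 : pvOpens.idxOf? ('.' : Char) = none := by decide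
      have e2 : pvCloses.idxOf? ('.' : Char) = none := by decide
      have hrow : pvRowAt cs (m + 1) = pvRowAt cs m := by
        rw [hsucc]
        simp [pvRowAt]
      have hstep : pvBalStep ((List.range (m + 1)).map (pvRowAt cs), false) '.' =
          ((List.range (m + 1)).map (pvRowAt cs) ++ [pvRowAt cs (m + 1)], false) := by
        simp [pvBalStep, e1, e2, hlast, hrow]
      rw [hstep, happ]
      exact ih (m + 1) (by omega) hdrop'
    · -- opening bracket
      have hrow : pvRowAt cs (m + 1) =
          pvRowSet (pvRowAt cs m) (pvT oc) (pvRowGet (pvRowAt cs m) (pvT oc) + 1) := by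
        rw [hsucc]
        fin_cases hoc <;> simp [pvRowSet, pvRowGet, pvRowAt, pvT] <;> try omega
      have hstep : pvBalStep ((List.range (m + 1)).map (pvRowAt cs), false) oc.1 =
          ((List.range (m + 1)).map (pvRowAt cs) ++ [pvRowAt cs (m + 1)], false) := by
        rw [hrow]
        simp [pvBalStep, pvT_opens oc hoc, hlast]
      rw [hstep, happ]
      exact ih (m + 1) (by omega) hdrop'
    · -- closing bracket
      have hpos : 1 ≤ pvBalT cs oc m := pvBalPos cs oc hoc m hcm hinits
      have hzero : ¬ (pvRowGet (pvRowAt cs m) (pvT oc) = 0) := by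
        rw [pvRowGet_rowAt cs m oc hoc]
        omega
      have hrow : pvRowAt cs (m + 1) =
          pvRowSet (pvRowAt cs m) (pvT oc) (pvRowGet (pvRowAt cs m) (pvT oc) - 1) := by
        rw [hsucc]
        fin_cases hoc <;> simp [pvRowSet, pvRowGet, pvRowAt, pvT] <;> try omega
      have hstep : pvBalStep ((List.range (m + 1)).map (pvRowAt cs), false) oc.2 =
          ((List.range (m + 1)).map (pvRowAt cs) ++ [pvRowAt cs (m + 1)], false) := by
        rw [hrow]
        simp [pvBalStep, pvT_opens_none oc hoc, pvT_closes oc hoc, hlast, hzero]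
      rw [hstep, happ]
      exact ih (m + 1) (by omega) hdrop'


lemma pvRowAt_zero (cs : List Char) : pvRowAt cs 0 = (0, 0, 0, 0) := by
  simp [pvRowAt, pvBalT]

lemma pvTable (cs : List Char)
    (hch : ∀ c ∈ cs, c ∈ ['.', '(', ')', '[', ']', '{', '}', '<', '>'])
    (hinits : ∀ p ∈ cs.inits, ∀ oc ∈ pvBrk, p.count oc.2 ≤ p.count oc.1) :
    cs.foldl pvBalStep ([(0, 0, 0, 0)], false) =
      ((List.range (cs.length + 1)).map (pvRowAt cs), false) := by
  have h0 : ([((0 : Int), (0 : Int), (0 : Int), (0 : Int))], false) =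
      ((List.range (0 + 1)).map (pvRowAt cs), (false : Bool)) := by
    simp [pvRowAt_zero]
  rw [h0]
  exact pvTableAux cs hch hinits cs 0 (Nat.zero_le _) rfl

-- ===== B's partner searches =====
lemma pvTableGetD (cs : List Char) (j : Nat) (hj : j ≤ cs.length) :
    ((List.range (cs.length + 1)).map (pvRowAt cs)).getD j (0, 0, 0, 0) = pvRowAt cs j := by
  rw [List.getD_eq_getElem?_getD, List.getElem?_map, List.getElem?_range (by omega)]
  rfl

lemma pvFindFirst (s n q : Nat) (p : Nat → Bool) (h1 : s ≤ q) (h2 : q < s + n)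
    (hp : p q = true) (hmin : ∀ r, s ≤ r → r < q → p r = false) :
    (List.range' s n).find? p = some q := by
  induction n generalizing s with
  | zero => omega
  | succ n ih =>
    rw [List.range'_succ, List.find?_cons]
    by_cases hs : s = q
    · subst hs; simp [hp]
    · rw [hmin s (le_refl s) (by omega)]
      exact ih (s + 1) (by omega) (by omega)
        (fun r hr1 hr2 => hmin r (by omega) hr2)

lemma pvGetD_of_getElem? (cs : List Char) (k : Nat) (c d : Char) (h : cs[k]? = some c) :
    cs.getD k d = c := by
  rw [List.getD_eq_getElem?_getD, h]; rfl

lemma pvPartnerOpen (cs : List Char) (oc : Char × Char) (hoc : oc ∈ pvBrk) (k b : Nat)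
    (hk : cs[k]? = some oc.1) (hb : cs[b]? = some oc.2) (hkb : k < b) (hbn : b < cs.length)
    (hbal : pvBalT cs oc b = pvBalT cs oc k + 1) (hgap : pvGap cs oc k b) :
    pvPartner cs ((List.range (cs.length + 1)).map (pvRowAt cs)) k oc.1 = b := by
  rw [pvPartner]
  simp only [pvT_opens oc hoc]
  rw [pvFindFirst (k + 1) (cs.length - (k + 1)) b _ (by omega) (by omega) ?_ ?_]
  · rfl
  · -- pred b
    rw [pvGetD_of_getElem? cs b _ ' ' hb, pvT_closes_getD oc hoc,
      pvTableGetD cs b (by omega), pvTableGetD cs k (by omega),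
      pvRowGet_rowAt cs b oc hoc, pvRowGet_rowAt cs k oc hoc]
    simp [hbal]
  · -- minimality
    intro r hr1 hr2
    rw [pvTableGetD cs r (by omega), pvTableGetD cs k (by omega),
      pvRowGet_rowAt cs r oc hoc, pvRowGet_rowAt cs k oc hoc]
    by_cases hcr : cs.getD r ' ' = oc.2
    · have hcr' : cs[r]? = some oc.2 := by
        rw [List.getD_eq_getElem?_getD, List.getElem?_eq_getElem (by omega)] at hcr
        rw [List.getElem?_eq_getElem (by omega)]
        simp_all
      have h1 := hgap (r + 1) (by omega) (by omega)
      have h2 := pvBalT_succ_close cs oc oc hoc hoc r hcr'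
      rw [if_pos rfl] at h2
      have : pvBalT cs oc r ≠ pvBalT cs oc k + 1 := by omega
      simp [this]
    · have hc2 : (cs.getD r ' ' == pvCloses.getD (pvT oc) ' ') = false := by
        rw [pvT_closes_getD oc hoc]
        exact beq_eq_false_iff_ne.2 hcr
      rw [hc2, Bool.false_and]

lemma pvPartnerClose (cs : List Char) (oc : Char × Char) (hoc : oc ∈ pvBrk) (a k : Nat)
    (ha : cs[a]? = some oc.1) (hk : cs[k]? = some oc.2) (hak : a < k) (hkn : k < cs.length)
    (hbal : pvBalT cs oc k = pvBalT cs oc a + 1) (hgap : pvGap cs oc a k) :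
    pvPartner cs ((List.range (cs.length + 1)).map (pvRowAt cs)) k oc.2 = a := by
  rw [pvPartner]
  simp only [pvT_opens_none oc hoc, pvT_closes oc hoc, Option.getD_some]
  have hmax : ((List.range k).filter (fun i =>
      cs.getD i ' ' == pvOpens.getD (pvT oc) ' ' &&
      pvRowGet (((List.range (cs.length + 1)).map (pvRowAt cs)).getD i (0, 0, 0, 0)) (pvT oc) ==
        pvRowGet (((List.range (cs.length + 1)).map (pvRowAt cs)).getD k (0, 0, 0, 0)) (pvT oc) - 1)).max?
      = some a := by
    rw [List.max?_eq_some_iff]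
    constructor
    · rw [List.mem_filter, List.mem_range]
      refine ⟨hak, ?_⟩
      rw [pvGetD_of_getElem? cs a _ ' ' ha, pvT_opens_getD oc hoc,
        pvTableGetD cs a (by omega), pvTableGetD cs k (by omega),
        pvRowGet_rowAt cs a oc hoc, pvRowGet_rowAt cs k oc hoc]
      simp
      omega
    · intro i hi
      rw [List.mem_filter, List.mem_range] at hi
      obtain ⟨hik, hpred⟩ := hi
      by_contra hgt
      have hai : a < i := by omega
      have := hgap i hai (by omega)
      rw [pvTableGetD cs i (by omega), pvTableGetD cs k (by omega),
        pvRowGet_rowAt cs i oc hoc, pvRowGet_rowAt cs k oc hoc] at hpred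
      simp at hpred
      omega
  rw [hmax]
  rfl

-- ===== A's two output sweeps, pointwise =====
-- pointwise value of A's fix-broken-pairs pass
lemma pvPhase3 (keep : PySem.Set Int) (cs : List Char) (M : List (Int × Int))
    (hM : ∀ p ∈ M, ∃ a b : Nat, p.1 = (a : Int) ∧ p.2 = (b : Int) ∧ a < b ∧ b < cs.length) :
    ∀ (I : List Char), I.length = cs.length → ∀ k : Nat, k < cs.length →
    ((pvPairsOf M).foldl (fun l p =>
      if p.1 < p.2 then
        if Bool.xor (PySem.Set.contains keep p.1) (PySem.Set.contains keep p.2) then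
          PySem.List.pySetD (PySem.List.pySetD l p.1 '.') p.2 '.'
        else l
      else l) I)[k]? =
    some (if M.any (fun p => (p.1 == (k : Int) || p.2 == (k : Int)) &&
            Bool.xor (PySem.Set.contains keep p.1) (PySem.Set.contains keep p.2)) then '.'
          else I.getD k '.') := by
  induction M with
  | nil =>
    intro I hI k hk
    simp only [pvPairsOf, List.flatMap_nil, List.foldl_nil, List.any_nil, Bool.false_eq_true,
      if_false]
    rw [List.getElem?_eq_getElem (by omega), List.getD_eq_getElem?_getD,
      List.getElem?_eq_getElem (by omega)]
    rfl
  | cons p M ih =>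
    obtain ⟨a, b, ha, hb, hab, hbm⟩ := hM p (by simp)
    have hM' : ∀ p ∈ M, ∃ a b : Nat, p.1 = (a : Int) ∧ p.2 = (b : Int) ∧ a < b ∧ b < cs.length :=
      fun q hq => hM q (List.mem_cons_of_mem _ hq)
    intro I hI k hk
    simp only [PySem.Set.contains] at ih ⊢
    have hcons : pvPairsOf (p :: M) = (p.2, p.1) :: (p.1, p.2) :: pvPairsOf M := by
      simp [pvPairsOf]
    rw [hcons, List.foldl_cons, List.foldl_cons]
    have hlt1 : ¬ ((p.2, p.1).1 < (p.2, p.1).2) := by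
      simp only [ha, hb]
      exact_mod_cast not_lt.2 (le_of_lt hab)
    have hlt2 : (p.1, p.2).1 < (p.1, p.2).2 := by
      simp only [ha, hb]
      exact_mod_cast hab
    rw [if_neg hlt1, if_pos hlt2]
    simp only [List.any_cons]
    by_cases hxor : Bool.xor (List.contains keep p.1) (List.contains keep p.2) = true
    · rw [if_pos hxor]
      have hI' : (PySem.List.pySetD (PySem.List.pySetD I p.1 '.') p.2 '.').length = cs.length := by
        simp [PySem.List.length_pySetD, hI]
      rw [ih hM' _ hI' k hk]
      by_cases hany : (M.any fun p => (p.1 == (k : Int) || p.2 == (k : Int)) &&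
          Bool.xor (List.contains keep p.1) (List.contains keep p.2)) = true
      · simp only [hany, Bool.or_true, if_pos rfl]
        rfl
      · have hany' : (M.any fun p => (p.1 == (k : Int) || p.2 == (k : Int)) &&
            Bool.xor (List.contains keep p.1) (List.contains keep p.2)) = false := by
          simp only [Bool.not_eq_true] at hany; exact hany
        simp only [hany', Bool.false_eq_true, if_false, Bool.or_false]
        by_cases hmem : (p.1 == (k : Int) || p.2 == (k : Int)) = true
        · rw [if_pos (by rw [hmem, Bool.true_and]; exact hxor)]
          rw [ha, hb, PySem.List.pySetD_natCast, PySem.List.pySetD_natCast,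
            List.getD_eq_getElem?_getD, List.getElem?_set, List.getElem?_set]
          rcases (show p.1 = ((k : Nat) : Int) ∨ p.2 = ((k : Nat) : Int) by simpa using hmem) with h | h
          · have hak : a = k := by rw [ha] at h; exact_mod_cast h
            subst hak
            by_cases hba : b = a <;> simp [hba, hI, List.length_set] <;> split <;> rfl
          · have hbk : b = k := by rw [hb] at h; exact_mod_cast h
            subst hbk
            simp [hI, List.length_set]
            split <;> rfl
        · rw [if_neg (by rw [Bool.and_eq_true]; exact fun h => hmem h.1)]
          have hka : ¬ a = k := by
            intro h; apply hmem; simp [ha, h]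
          have hkb : ¬ b = k := by
            intro h; apply hmem; simp [hb, h]
          rw [ha, hb, PySem.List.pySetD_natCast, PySem.List.pySetD_natCast,
            List.getD_eq_getElem?_getD, List.getElem?_set, List.getElem?_set,
            if_neg (by exact_mod_cast hkb), if_neg (by exact_mod_cast hka),
            ← List.getD_eq_getElem?_getD]
    · rw [if_neg hxor]
      rw [ih hM' I hI k hk]
      have hx' : ((p.1 == (k : Int) || p.2 == (k : Int)) &&
          Bool.xor (List.contains keep p.1) (List.contains keep p.2)) = false := by
        simp only [Bool.not_eq_true] at hxor
        simp only [hxor, Bool.and_false]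
      simp only [hx', Bool.false_or]
      rfl

lemma pvPhase3Len (keep : PySem.Set Int) (P : List (Int × Int)) (I : List Char) :
    (P.foldl (fun l p =>
      if p.1 < p.2 then
        if Bool.xor (PySem.Set.contains keep p.1) (PySem.Set.contains keep p.2) then
          PySem.List.pySetD (PySem.List.pySetD l p.1 '.') p.2 '.'
        else l
      else l) I).length = I.length := by
  induction P generalizing I with
  | nil => rfl
  | cons p rest ih =>
    rw [List.foldl_cons]
    split_ifs <;> rw [ih] <;> simp [PySem.List.length_pySetD]

-- pointwise value of A's blanking pass
lemma pvSslGet (keep : PySem.Set Int) (cs : List Char) (k : Nat) (hk : k < cs.length) :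
    (((PySem.List.enumerate cs 0).map
        (fun p => if PySem.Set.contains keep p.1 then p.2 else '.')).getD k '.') =
      (if PySem.Set.contains keep ((k : Nat) : Int) then cs.getD k '.' else '.') := by
  rw [List.getD_eq_getElem?_getD, List.getElem?_map, PySem.List.getElem?_enumerate,
    List.getElem?_eq_getElem hk, List.getD_eq_getElem?_getD, List.getElem?_eq_getElem hk]
  simp

-- ===== VERDICT (by name: the statement is the Claim_ definition above) =====
theorem mask_ss_spec : Claim_equal_mask_ss := by
  unfold Claim_equal_mask_ss Spec_mask_ss
  intro ss indices _ hpre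
  obtain ⟨hch0, hinits0, htot0⟩ := hpre
  have hch : ∀ c ∈ ss.toList, c ∈ ['.', '(', ')', '[', ']', '{', '}', '<', '>'] := by
    simpa using hch0
  have hinits : ∀ p ∈ ss.toList.inits, ∀ oc ∈ pvBrk, p.count oc.2 ≤ p.count oc.1 := by
    simpa using hinits0
  have htot : ∀ oc ∈ pvBrk, ss.toList.count oc.2 = ss.toList.count oc.1 := by
    simpa using htot0
  set cs := ss.toList with hcs
  set keep : PySem.Set Int := PySem.Set.ofList indices with hkeep
  obtain ⟨stk', M', eqA, hInv'⟩ :=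
    pvFoldA cs hch hinits cs 0 (Nat.zero_le _) rfl ([], [], [], []) [] (pvInvInit cs)
  have e0 : (((0 : Nat) : Int)) = (0 : Int) := by norm_num
  rw [e0] at eqA
  -- all stacks are empty at the end
  have hbal0 : ∀ oc ∈ pvBrk, pvBalT cs oc cs.length = 0 := by
    intro oc hoc
    rw [pvBalT, List.take_length]
    have := htot oc hoc
    omega
  have hempty : ∀ oc ∈ pvBrk, pvSGet stk' oc.1 = [] := by
    intro oc hoc
    have h2 := (hInv'.1 oc hoc).2
    rw [hbal0 oc hoc] at h2
    have : (pvSGet stk' oc.1).length = 0 := by exact_mod_cast h2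
    exact List.length_eq_zero_iff.1 this
  have h1 : stk'.1 = [] := by simpa [pvSGet] using hempty ('(', ')') (by decide)
  have h2 : stk'.2.1 = [] := by simpa [pvSGet] using hempty ('[', ']') (by decide)
  have h3 : stk'.2.2.1 = [] := by simpa [pvSGet] using hempty ('{', '}') (by decide)
  have h4 : stk'.2.2.2 = [] := by simpa [pvSGet] using hempty ('<', '>') (by decide)
  have hlo : pvLeftover stk' = false := by
    simp [pvLeftover, h1, h2, h3, h4]
  -- B's table and its end row
  have htab := pvTable cs hch hinits
  have hlastrow : ((List.range (cs.length + 1)).map (pvRowAt cs)).getLast?.getD (0, 0, 0, 0) =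
      pvRowAt cs cs.length := pvTableLast cs cs.length
  have hrow0 : pvRowAt cs cs.length = (0, 0, 0, 0) := by
    rw [pvRowAt, hbal0 ('(', ')') (by decide), hbal0 ('[', ']') (by decide),
      hbal0 ('{', '}') (by decide), hbal0 ('<', '>') (by decide)]
  -- reduce both programs to their success branches
  simp only [mask_ss, mask_ss_alt, ← hcs, ← hkeep]
  rw [show (PySem.Dict.empty : PySem.Dict Int Int) = PySem.Dict.mk (pvPairsOf []) from rfl]
  rw [eqA, htab]
  have hl2 : (Option.map (pvRowAt cs) (List.range (cs.length + 1)).getLast?).getD (0, 0, 0, 0) =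
      ((0 : Int), (0 : Int), (0 : Int), (0 : Int)) := by
    calc (Option.map (pvRowAt cs) (List.range (cs.length + 1)).getLast?).getD (0, 0, 0, 0)
        = ((List.range (cs.length + 1)).map (pvRowAt cs)).getLast?.getD (0, 0, 0, 0) := by
          rw [List.getLast?_map]
      _ = (0, 0, 0, 0) := by rw [hlastrow, hrow0]
  rw [if_neg (by simp [hlo]), if_neg (by simp [hl2, pvRowGet])]
  -- invariant facts at the end
  have hnd' : (pvFlat M').Nodup := by
    have := hInv'.2.2.1
    rw [pvMS, h1, h2, h3, h4] at this
    simpa using this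
  have hcov' : ∀ k : Nat, k < cs.length → cs.getD k '.' = '.' ∨ ((k : Nat) : Int) ∈ pvFlat M' := by
    intro k hk
    rcases hInv'.2.2.2.2 k hk with h | h
    · exact Or.inl h
    · right
      rw [pvMS, h1, h2, h3, h4] at h
      simpa using h
  have hMOk' := hInv'.2.1
  have hssl : ((PySem.List.enumerate cs 0).map
      (fun p => if PySem.Set.contains keep p.1 then p.2 else '.')).length = cs.length := by
    simp [PySem.List.length_enumerate]
  apply congrArg String.ofList
  have hit : (PySem.Dict.mk (pvPairsOf M')).items = pvPairsOf M' := rfl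
  rw [hit]
  apply List.ext_getElem?
  intro k
  by_cases hk : k < cs.length
  · -- left side: A's two sweeps, pointwise
    rw [pvPhase3 keep cs M'
        (fun p hp => by
          obtain ⟨oc, hoc, a, b, e1, e2, e3, e4, _⟩ := hMOk' p hp
          exact ⟨a, b, e1, e2, e3, e4⟩) _ hssl k hk,
      pvSslGet keep cs k hk]
    -- right side: B's per-position pass, pointwise
    rw [List.getElem?_map, List.getElem?_range hk]
    simp only [Option.map_some]
    have hgetk : cs[k]? = some (cs.getD k '.') := by
      rw [List.getD_eq_getElem?_getD, List.getElem?_eq_getElem hk]; rfl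
    have hkcs : cs.getD k '.' ∈ cs := by
      rw [List.getD_eq_getElem?_getD, List.getElem?_eq_getElem hk]
      exact List.getElem_mem hk
    rcases pvCharCases _ (hch _ hkcs) with hdot | ⟨oc, hoc, hopen⟩ | ⟨oc, hoc, hclose⟩
    · -- '.' position
      have hkflat : ((k : Nat) : Int) ∉ pvFlat M' := by
        intro hmem
        obtain ⟨p, hp, hpk⟩ := pvFlatMem M' _ hmem
        obtain ⟨oc, hoc, a, b, e1, e2, _, _, e5, e6, _⟩ := hMOk' p hp
        rcases hpk with h | h
        · rw [e1] at h
          have : a = k := by exact_mod_cast h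
          subst this
          rw [hgetk, hdot] at e5
          exact pvOpen_ne_dot oc hoc (by injection e5 with e; exact e.symm) |>.elim
        · rw [e2] at h
          have : b = k := by exact_mod_cast h
          subst this
          rw [hgetk, hdot] at e6
          exact pvClose_ne_dot oc hoc (by injection e6 with e; exact e.symm) |>.elim
      rw [pvAnyNotMem M' _ hkflat]
      rw [hdot]
      simp
    · -- opening bracket
      have hkflat : ((k : Nat) : Int) ∈ pvFlat M' := by
        rcases hcov' k hk with h | h
        · rw [h] at hopen
          exact absurd hopen.symm (pvOpen_ne_dot oc hoc)
        · exact h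
      obtain ⟨p, hp, hpk⟩ := pvFlatMem M' _ hkflat
      obtain ⟨oc', hoc', a, b, e1, e2, e3, e4, e5, e6, e7, e8⟩ := hMOk' p hp
      have hk1 : p.1 = ((k : Nat) : Int) := by
        rcases hpk with h | h
        · exact h
        · exfalso
          rw [e2] at h
          have hbk : b = k := by exact_mod_cast h
          rw [hbk, hgetk, hopen] at e6
          exact pvOpen_ne_close oc oc' hoc hoc' (Option.some.inj e6)
      have hak : a = k := by rw [e1] at hk1; exact_mod_cast hk1
      rw [hak] at e1 e3 e5 e7 e8
      have hocc : oc' = oc := by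
        apply pvFstInj oc' oc hoc' hoc
        rw [hgetk, hopen] at e5
        exact (Option.some.inj e5).symm
      rw [hocc] at e5 e6 e7 e8
      have hpart : pvPartner cs ((List.range (cs.length + 1)).map (pvRowAt cs)) k (cs.getD k '.') = b := by
        rw [hopen]
        exact pvPartnerOpen cs oc hoc k b e5 e6 e3 e4 e7 e8
      rw [hpart]
      rw [pvUniqueMatch M' hnd' _ p hp (Or.inl hk1)
        (fun q => Bool.xor (PySem.Set.contains keep q.1) (PySem.Set.contains keep q.2))]
      have hopen' : cs[k]?.getD '.' = oc.1 := by
        rw [← List.getD_eq_getElem?_getD]; exact hopen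
      by_cases cka : ((k : Nat) : Int) ∈ keep <;>
        by_cases ckb : ((b : Nat) : Int) ∈ keep <;>
          simp [PySem.Set.contains, hk1, e2, cka, ckb, hopen, hopen', pvOpen_ne_dot oc hoc]
    · -- closing bracket
      have hkflat : ((k : Nat) : Int) ∈ pvFlat M' := by
        rcases hcov' k hk with h | h
        · rw [h] at hclose
          exact absurd hclose.symm (pvClose_ne_dot oc hoc)
        · exact h
      obtain ⟨p, hp, hpk⟩ := pvFlatMem M' _ hkflat
      obtain ⟨oc', hoc', a, b, e1, e2, e3, e4, e5, e6, e7, e8⟩ := hMOk' p hp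
      have hk2 : p.2 = ((k : Nat) : Int) := by
        rcases hpk with h | h
        · exfalso
          rw [e1] at h
          have hak : a = k := by exact_mod_cast h
          rw [hak, hgetk, hclose] at e5
          exact pvOpen_ne_close oc' oc hoc' hoc (Option.some.inj e5).symm
        · exact h
      have hbk : b = k := by rw [e2] at hk2; exact_mod_cast hk2
      rw [hbk] at e2 e3 e4 e6 e7 e8
      have hocc : oc' = oc := by
        apply pvSndInj oc' oc hoc' hoc
        rw [hgetk, hclose] at e6
        exact (Option.some.inj e6).symm
      rw [hocc] at e5 e6 e7 e8
      have hpart : pvPartner cs ((List.range (cs.length + 1)).map (pvRowAt cs)) k (cs.getD k '.') = a := by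
        rw [hclose]
        exact pvPartnerClose cs oc hoc a k e5 e6 e3 e4 e7 e8
      rw [hpart]
      rw [pvUniqueMatch M' hnd' _ p hp (Or.inr hk2)
        (fun q => Bool.xor (PySem.Set.contains keep q.1) (PySem.Set.contains keep q.2))]
      have hclose' : cs[k]?.getD '.' = oc.2 := by
        rw [← List.getD_eq_getElem?_getD]; exact hclose
      by_cases cka : ((a : Nat) : Int) ∈ keep <;>
        by_cases ckb : ((k : Nat) : Int) ∈ keep <;>
          simp [PySem.Set.contains, e1, hk2, cka, ckb, hclose, hclose', pvClose_ne_dot oc hoc]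
  · rw [List.getElem?_eq_none (by rw [pvPhase3Len]; omega),
      List.getElem?_eq_none (by simp; omega)]
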